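-- pv_equiv track=rewrite | github.com/Jestyr22/StaticSiteGenerator | src/node_delimiter.py | find_delimiters
-- ===== SOURCE A (Python) =====
-- def find_delimiters(text, delimiter): #New function to find pairs of delimiters
--     current_position = 0
--     result = []
--
--     while current_position < len(text):
--         opening_position = text.find(delimiter, current_position)
--         if opening_position == -1:  # No more delimiters found
--             # Add remaining text and exit
--             remaining = text[current_position:]
--             if remaining:  # Only add if there's content
--                 result.append((remaining, False))
--             break
--
--         # Add text before the opening delimiter
--         if opening_position > current_position:
--             result.append((text[current_position:opening_position], False))
--
--         closing_position = text.find(delimiter, opening_position + len(delimiter))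
--         if closing_position == -1:  # No closing delimiter
--             # Just treat the opening delimiter as regular text
--             result.append((text[opening_position:], False))
--             break
--
--         # Extract and add the delimited content
--         content = text[opening_position + len(delimiter):closing_position]
--         result.append((content, True))
--
--         # Move current position to after the closing delimiter
--         current_position = closing_position + len(delimiter)
--
--     # No need for the extra check after the loop
--     # as we already handle remaining text when no more delimiters are found
--
--     return result
--
--
--     '''
--     OLD CODE
--
--     current_position = 0 #Counter to find the delimiters in old_node.text
--     result = [] #Empty list to store all results
--
--     if delimiter not in text: #Checks for delimiter existence
--         result.append((text, False)) #Adds text to result list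
--         return result #Returns early because if there's no delimiter, it's already as split as can be
--     while current_position < len(text): #Loops through until it's gone through all characters in text
--
--         opening_position = text.find(delimiter, current_position) #Finds first delimiter
--         if opening_position == -1: #If no more delimiters are found
--             break #exits loop
--
--         closing_position = text.find(delimiter, opening_position + len(delimiter)) #Finds first delimiter **after** the one at opening_position (Hence adding the length of the delimiter)
--         if closing_position == -1: #If there's not a closing delimiter
--             raise ValueError(f"No closing delimiter '{delimiter}'") #Raise an error because they should always come in pairs
--
--         content = text[opening_position + len(delimiter):closing_position]  #Extracts the content between delimiters.
--                                                                             #opening_position + len() to find the first character after first delimiter,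
--                                                                             #closing_position to find the endpoint
--
--         pre_content = text[current_position:opening_position] #Gets the text before first delimiter
--         result.append((pre_content, False)) #Adds to list, False indicates that it doesn't need a special tag, and is just text
--         result.append((content, True))
--         current_position = closing_position + len(delimiter) #Sets current position to after the pair has been found
--     if current_position < len(text):
--         result.append((text[current_position:], False)) #Adds text after final delimiter to result
--     return result'''
-- ===== SOURCE B (Python) =====
-- def find_delimiters(text, delimiter):
--     # split once, then a parity pass: even parts are outside text (kept if
--     # non-empty), odd parts are delimited content, except an odd FINAL part,
--     # which means an unmatched opening delimiter and stays plain text.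
--     parts = text.split(delimiter)
--     result = []
--     inside = False
--     for k, part in enumerate(parts):
--         if not inside:
--             if part:
--                 result.append((part, False))
--         elif k == len(parts) - 1:
--             result.append((delimiter + part, False))
--         else:
--             result.append((part, True))
--         inside = not inside
--     return result
-- ===== Notes on version B (the rewrite author's own statement) =====
-- stated objective: simpler
-- what changed: Replaces A's find/advance position scan (two finds and three slices per iteration) with a single text.split(delimiter) followed by one parity pass over the parts, special-casing an odd final part as an unmatched opening delimiter.
-- outside the precondition, e.g. on find_delimiters('', ''): A returns [], B raises ValueError
import Mathlib
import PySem

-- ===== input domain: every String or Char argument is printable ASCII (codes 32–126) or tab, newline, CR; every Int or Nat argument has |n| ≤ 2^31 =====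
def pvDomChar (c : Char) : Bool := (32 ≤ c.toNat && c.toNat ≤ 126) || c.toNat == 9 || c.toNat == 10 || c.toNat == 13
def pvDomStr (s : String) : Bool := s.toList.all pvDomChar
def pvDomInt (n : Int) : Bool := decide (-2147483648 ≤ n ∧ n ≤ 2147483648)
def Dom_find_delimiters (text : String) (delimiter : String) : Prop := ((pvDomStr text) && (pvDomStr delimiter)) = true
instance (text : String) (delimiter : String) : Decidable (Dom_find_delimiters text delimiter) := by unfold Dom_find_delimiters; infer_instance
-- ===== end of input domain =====

-- B replaces A's find/advance position scan with one split + a parity pass (objective: simpler).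

-- ===== PORT A =====
-- A's while-loop over current_position; fuel only guards totality (with a
-- non-empty delimiter the loop advances, text.length + 1 steps suffice).
def findDelimitersLoop (t d : List Char) (fuel : Nat) (cp : Int)
    (acc : List (List Char × Bool)) : List (List Char × Bool) :=
  match fuel with
  | 0 => acc
  | fuel + 1 =>
    if cp < PySem.Chars.len t then
      let op := PySem.Chars.findFrom t d cp none
      if op = -1 then
        let remaining := PySem.Chars.slice t (some cp) none
        if remaining ≠ [] then acc ++ [(remaining, false)] else acc
      else
        let acc1 := if op > cp then acc ++ [(PySem.Chars.slice t (some cp) (some op), false)] else acc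
        let cl := PySem.Chars.findFrom t d (op + PySem.Chars.len d) none
        if cl = -1 then acc1 ++ [(PySem.Chars.slice t (some op) none, false)]
        else
          let content := PySem.Chars.slice t (some (op + PySem.Chars.len d)) (some cl)
          findDelimitersLoop t d fuel (cl + PySem.Chars.len d) (acc1 ++ [(content, true)])
    else acc

def find_delimiters (text : String) (delimiter : String) : List (String × Bool) :=
  (findDelimitersLoop text.toList delimiter.toList (text.toList.length + 1) 0 []).map
    (fun p => (String.ofList p.1, p.2))

-- ===== PORT B =====
-- Source B's for-loop over enumerate(parts) with the `inside` flag, as structural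
-- recursion over the parts list; `rest = []` is the `k == len(parts) - 1` test.
def findDelimitersParts (d : List Char) : Bool → List (List Char) → List (List Char × Bool)
  | _, [] => []
  | false, p :: rest => (if p = [] then [] else [(p, false)]) ++ findDelimitersParts d true rest
  | true, p :: rest =>
      (if rest = [] then [(d ++ p, false)] else [(p, true)]) ++ findDelimitersParts d false rest

def find_delimiters_alt (text : String) (delimiter : String) : List (String × Bool) :=
  (findDelimitersParts delimiter.toList false
      (PySem.Chars.splitOn text.toList delimiter.toList)).map
    (fun p => (String.ofList p.1, p.2))

-- ===== PRECONDITION & SPEC =====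
-- Pre_ excludes only delimiter = "": B's text.split("") raises ValueError there,
-- while A never returns (the while-loop no longer advances) except on the empty
-- text, where it trivially returns [].
def Pre_find_delimiters (_text : String) (delimiter : String) : Prop := delimiter ≠ ""
instance (text : String) (delimiter : String) : Decidable (Pre_find_delimiters text delimiter) := by
  unfold Pre_find_delimiters; infer_instance

def pvWitness_find_delimiters : String × String := ("a*b*c*d", "*")

def Spec_find_delimiters (text : String) (delimiter : String) (out : List (String × Bool)) : Prop := out = find_delimiters_alt text delimiter
instance (text : String) (delimiter : String) (out : List (String × Bool)) : Decidable (Spec_find_delimiters text delimiter out) := by unfold Spec_find_delimiters; infer_instance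

-- ===== CLAIM (what is proved, stated in full; the proofs are below) =====
def Claim_equal_find_delimiters : Prop := ∀ (text : String) (delimiter : String), Dom_find_delimiters text delimiter → Pre_find_delimiters text delimiter → Spec_find_delimiters text delimiter (find_delimiters text delimiter)

-- ===== LEMMAS AND PROOFS =====

-- Reference splitter: first occurrence via Chars.find, recursing on the tail.
def pvSplit (d s : List Char) : List (List Char) :=
  if _h : 0 ≤ PySem.Chars.find s d ∧ d ≠ [] then
    s.take (PySem.Chars.find s d).toNat ::
      pvSplit d (s.drop ((PySem.Chars.find s d).toNat + d.length))
  else [s]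
termination_by s.length
decreasing_by
  · have h0 := _h.1
    have hinf : d <:+: s := (PySem.Chars.find_nonneg_iff s d).mp h0
    have hlen : d.length ≤ s.length := hinf.length_le
    have hs : s ≠ [] := by
      intro hnil; subst hnil
      simp at hlen
      exact _h.2 hlen
    have : 0 < d.length := List.length_pos_iff.mpr _h.2
    have : 0 < s.length := List.length_pos_iff.mpr hs
    simp only [List.length_drop]
    omega

lemma pvSplit_ne_nil (d s : List Char) : pvSplit d s ≠ [] := by
  rw [pvSplit]; split <;> simp

-- first-occurrence facts about Chars.find
lemma pv_find_eq_of (d s : List Char) (_hd : d ≠ []) (j : Nat)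
    (h1 : d <+: s.drop j) (h2 : ∀ i < j, ¬ d <+: s.drop i) :
    PySem.Chars.find s d = (j : Int) := by
  have hinf : d <:+: s := h1.isInfix.trans (List.drop_suffix j s).isInfix
  have h0 : 0 ≤ PySem.Chars.find s d := (PySem.Chars.find_nonneg_iff s d).mpr hinf
  obtain ⟨hp, hmin⟩ := PySem.Chars.find_spec h0
  set f := (PySem.Chars.find s d).toNat with hf
  have hjf : ¬ f < j := fun hlt => h2 f hlt hp
  have hfj : ¬ j < f := fun hlt => hmin j hlt h1
  have : f = j := by omega
  omega

lemma pv_occ (d s : List Char) (hd : d ≠ []) (h : 0 ≤ PySem.Chars.find s d) :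
    d <+: s.drop (PySem.Chars.find s d).toNat ∧
      (PySem.Chars.find s d).toNat + d.length ≤ s.length := by
  obtain ⟨hp, _⟩ := PySem.Chars.find_spec h
  refine ⟨hp, ?_⟩
  have h1 : d.length ≤ (s.drop (PySem.Chars.find s d).toNat).length := hp.length_le
  have h2 : 0 < d.length := List.length_pos_iff.mpr hd
  simp only [List.length_drop] at h1
  omega

-- relating pvSplit to PySem.Chars.splitOn.go
def pvPrep (pre : List Char) : List (List Char) → List (List Char)
  | [] => [pre]
  | h :: t => (pre ++ h) :: t

lemma pv_find_nil (d : List Char) (hd : d ≠ []) : PySem.Chars.find [] d = -1 := by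
  rw [PySem.Chars.find_eq_neg_one_iff]
  intro h
  exact hd (List.eq_nil_of_infix_nil h)

lemma pv_find_neg_one (s d : List Char) (h : ¬ 0 ≤ PySem.Chars.find s d) :
    PySem.Chars.find s d = -1 := by
  have := PySem.Chars.neg_one_le_find s d
  omega

lemma pv_find_cons_neg (d : List Char) (c : Char) (rest : List Char)
    (h : PySem.Chars.find (c :: rest) d = -1) : PySem.Chars.find rest d = -1 := by
  rw [PySem.Chars.find_eq_neg_one_iff] at h ⊢
  intro hinf
  exact h (hinf.trans (List.suffix_cons c rest).isInfix)

lemma pv_find_pos_of_not_prefix (d : List Char) (c : Char) (rest : List Char)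
    (hnp : ¬ d <+: (c :: rest)) (h0 : 0 ≤ PySem.Chars.find (c :: rest) d) :
    1 ≤ (PySem.Chars.find (c :: rest) d).toNat := by
  obtain ⟨hp, _⟩ := PySem.Chars.find_spec h0
  by_contra hlt
  have hz : (PySem.Chars.find (c :: rest) d).toNat = 0 := by omega
  rw [hz] at hp
  exact hnp (by simpa using hp)

lemma pv_find_cons_pos (d : List Char) (c : Char) (rest : List Char) (hd : d ≠ [])
    (hnp : ¬ d <+: (c :: rest)) (h0 : 0 ≤ PySem.Chars.find (c :: rest) d) :
    PySem.Chars.find rest d = PySem.Chars.find (c :: rest) d - 1 := by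
  obtain ⟨hp, hmin⟩ := PySem.Chars.find_spec h0
  set j := (PySem.Chars.find (c :: rest) d).toNat with hj
  have hj1 : 1 ≤ j := pv_find_pos_of_not_prefix d c rest hnp h0
  have h1 : d <+: rest.drop (j - 1) := by
    have : (c :: rest).drop j = rest.drop (j - 1) := by
      conv_lhs => rw [show j = (j - 1) + 1 by omega]
      simp [List.drop_succ_cons]
    rwa [this] at hp
  have h2 : ∀ i < j - 1, ¬ d <+: rest.drop i := by
    intro i hi hcontra
    exact hmin (i + 1) (by omega) (by simpa [List.drop_succ_cons] using hcontra)
  have := pv_find_eq_of d rest hd (j - 1) h1 h2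
  omega

lemma pv_go_nil (d : List Char) (fuel : Nat) (cur : List Char) (acc : List (List Char)) :
    PySem.Chars.splitOn.go d fuel [] cur acc = (cur.reverse :: acc).reverse := by
  cases fuel <;> rw [PySem.Chars.splitOn.go] <;> simp

lemma pv_go_eq (d : List Char) (hd : d ≠ []) :
    ∀ (fuel : Nat) (l cur : List Char) (acc : List (List Char)),
      l.length ≤ fuel →
      PySem.Chars.splitOn.go d fuel l cur acc =
        acc.reverse ++ pvPrep cur.reverse (pvSplit d l) := by
  intro fuel
  induction fuel with
  | zero =>
    intro l cur acc hlen
    have hl : l = [] := by simpa using List.length_eq_zero_iff.mp (by omega)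
    subst hl
    rw [PySem.Chars.splitOn.go, pvSplit]
    simp [pv_find_nil d hd, pvPrep]
  | succ fuel ih =>
    intro l cur acc hlen
    match l with
    | [] =>
      rw [pv_go_nil, pvSplit]
      simp [pv_find_nil d hd, pvPrep]
    | c :: rest =>
      rw [PySem.Chars.splitOn.go]
      by_cases hp : d.isPrefixOf (c :: rest) = true
      · simp only [hp, if_true]
        have hpre : d <+: (c :: rest) := List.isPrefixOf_iff_prefix.mp hp
        have hfind : PySem.Chars.find (c :: rest) d = 0 := by
          have := pv_find_eq_of d (c :: rest) hd 0 (by simpa using hpre) (by omega)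
          simpa using this
        have hdrop : ((c :: rest).drop d.length).length ≤ fuel := by
          have hd1 : 1 ≤ d.length := List.length_pos_iff.mpr hd
          simp only [List.length_drop, List.length_cons]
          simp only [List.length_cons] at hlen
          omega
        rw [ih _ [] (cur.reverse :: acc) hdrop]
        conv_rhs => rw [pvSplit]
        rw [dif_pos ⟨by omega, hd⟩]
        obtain ⟨h1, t1, hX⟩ : ∃ h1 t1, pvSplit d ((c :: rest).drop (((PySem.Chars.find (c :: rest) d).toNat) + d.length)) = h1 :: t1 := by
          rcases hhh : pvSplit d ((c :: rest).drop (((PySem.Chars.find (c :: rest) d).toNat) + d.length)) with _ | ⟨h1, t1⟩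
          · exact absurd hhh (pvSplit_ne_nil _ _)
          · exact ⟨h1, t1, rfl⟩
        simp only [hfind, Int.toNat_zero, zero_add] at hX
        simp [hfind, hX, pvPrep]
      · simp only [hp]
        have hnp : ¬ d <+: (c :: rest) := fun hc => hp (List.isPrefixOf_iff_prefix.mpr hc)
        rw [ih rest (c :: cur) acc (by simp only [List.length_cons] at hlen; omega)]
        by_cases h0 : 0 ≤ PySem.Chars.find (c :: rest) d
        · set j := (PySem.Chars.find (c :: rest) d).toNat with hj
          have hj1 : 1 ≤ j := pv_find_pos_of_not_prefix d c rest hnp h0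
          have hrest : PySem.Chars.find rest d = PySem.Chars.find (c :: rest) d - 1 :=
            pv_find_cons_pos d c rest hd hnp h0
          conv_rhs => rw [pvSplit]
          conv_lhs => rw [pvSplit]
          rw [dif_pos ⟨by omega, hd⟩, dif_pos ⟨by omega, hd⟩]
          have htoNat : (PySem.Chars.find rest d).toNat = j - 1 := by omega
          have htake : (c :: rest).take j = c :: rest.take (j - 1) := by
            conv_lhs => rw [show j = (j - 1) + 1 by omega]
            simp
          have hdropeq : rest.drop ((j - 1) + d.length) = (c :: rest).drop (j + d.length) := by
            conv_rhs => rw [show j + d.length = ((j - 1) + d.length) + 1 by omega]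
            simp [List.drop_succ_cons]
          rw [htoNat, htake, hdropeq, ← hj]
          simp [pvPrep]
        · have hneg : PySem.Chars.find (c :: rest) d = -1 := pv_find_neg_one _ _ h0
          have hnegr : PySem.Chars.find rest d = -1 := pv_find_cons_neg d c rest hneg
          have hsl : pvSplit d (c :: rest) = [c :: rest] := by
            rw [pvSplit]; exact dif_neg (by simp [hneg])
          have hsr : pvSplit d rest = [rest] := by
            rw [pvSplit]; exact dif_neg (by simp [hnegr])
          simp [hsl, hsr, pvPrep]

lemma pv_splitOn_eq (d s : List Char) (hd : d ≠ []) :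
    PySem.Chars.splitOn s d = pvSplit d s := by
  rw [PySem.Chars.splitOn, pv_go_eq d hd (s.length + 1) s [] [] (by omega)]
  obtain ⟨h1, t1, hX⟩ : ∃ h1 t1, pvSplit d s = h1 :: t1 := by
    rcases hhh : pvSplit d s with _ | ⟨h1, t1⟩
    · exact absurd hhh (pvSplit_ne_nil _ _)
    · exact ⟨h1, t1, rfl⟩
  simp [hX, pvPrep]

lemma pvSplit_cons (d s : List Char) (hd : d ≠ []) (h0 : 0 ≤ PySem.Chars.find s d) :
    pvSplit d s =
      s.take (PySem.Chars.find s d).toNat ::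
        pvSplit d (s.drop ((PySem.Chars.find s d).toNat + d.length)) := by
  rw [pvSplit]; exact dif_pos ⟨h0, hd⟩

lemma pvSplit_single (d s : List Char) (hneg : PySem.Chars.find s d = -1) :
    pvSplit d s = [s] := by
  rw [pvSplit]; exact dif_neg (by simp [hneg])

lemma pv_drop_eq_append (d s : List Char) (j : Nat) (hpre : d <+: s.drop j) :
    s.drop j = d ++ s.drop (j + d.length) := by
  obtain ⟨u, hu⟩ := hpre
  rw [← hu]
  congr 1
  have : s.drop (j + d.length) = (s.drop j).drop d.length := by
    rw [List.drop_drop]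
  rw [this, ← hu, List.drop_left]

-- A's loop, on the suffix t.drop n, equals B's parity pass over pvSplit.
lemma pv_loop_eq (d : List Char) (hd : d ≠ []) :
    ∀ (fuel : Nat) (s t : List Char) (n : Nat) (acc : List (List Char × Bool)),
      t.drop n = s → s.length + 1 ≤ fuel →
      findDelimitersLoop t d fuel (n : Int) acc =
        acc ++ findDelimitersParts d false (pvSplit d s) := by
  intro fuel
  induction fuel with
  | zero => intro s t n acc hdrop hlen; omega
  | succ fuel ih =>
    intro s t n acc hdrop hlen
    have hd1 : 1 ≤ d.length := List.length_pos_iff.mpr hd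
    rw [findDelimitersLoop]
    simp only [PySem.Chars.len_eq]
    by_cases hcp : (n : Int) < (t.length : Int)
    · rw [if_pos hcp]
      have hn : n < t.length := by exact_mod_cast hcp
      have hnle : n ≤ t.length := le_of_lt hn
      have hslen : s.length = t.length - n := by rw [← hdrop]; simp
      have hsne : s ≠ [] := by
        intro h; rw [h] at hslen; simp at hslen; omega
      have hff : PySem.Chars.findFrom t d (n : Int) none =
          if PySem.Chars.find s d = -1 then -1
          else (n : Int) + PySem.Chars.find s d := by
        rw [PySem.Chars.findFrom_natCast t d n hnle, hdrop]
      by_cases h0 : 0 ≤ PySem.Chars.find s d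
      · -- an opening delimiter exists in the suffix
        have hfne : PySem.Chars.find s d ≠ -1 := by omega
        set j := (PySem.Chars.find s d).toNat with hj
        have hjf : PySem.Chars.find s d = (j : Int) := by omega
        obtain ⟨hpre, hocc⟩ := pv_occ d s hd h0
        rw [hff, if_neg hfne]
        rw [if_neg (show ¬((n : Int) + PySem.Chars.find s d = -1) by omega)]
        have hslice1 : PySem.Chars.slice t (some (n : Int))
            (some ((n : Int) + PySem.Chars.find s d)) = s.take j := by
          rw [hjf, show (n : Int) + (j : Int) = ((n + j : Nat) : Int) by push_cast; ring]
          simp only [PySem.Chars.slice_eq_listSlice]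
          rw [PySem.List.slice_natCast, hdrop]
          congr 1
          omega
        have hrest : t.drop (n + j + d.length) = s.drop (j + d.length) := by
          rw [← hdrop, List.drop_drop]
          congr 1
          omega
        have hmle : n + j + d.length ≤ t.length := by omega
        have hff2 : PySem.Chars.findFrom t d
            ((n : Int) + PySem.Chars.find s d + (d.length : Int)) none =
            (if PySem.Chars.find (s.drop (j + d.length)) d = -1 then -1
             else ((n + j + d.length : Nat) : Int) +
               PySem.Chars.find (s.drop (j + d.length)) d) := by
          rw [show (n : Int) + PySem.Chars.find s d + (d.length : Int) =
              ((n + j + d.length : Nat) : Int) by rw [hjf]; push_cast; ring]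
          rw [PySem.Chars.findFrom_natCast t d (n + j + d.length) hmle, hrest]
        by_cases k0 : 0 ≤ PySem.Chars.find (s.drop (j + d.length)) d
        · -- a closing delimiter exists too: one full loop iteration, then IH
          set rest := s.drop (j + d.length) with hrestdef
          have hkne : PySem.Chars.find rest d ≠ -1 := by omega
          set k := (PySem.Chars.find rest d).toNat with hk
          have hkf : PySem.Chars.find rest d = (k : Int) := by omega
          obtain ⟨hpre2, hocc2⟩ := pv_occ d rest hd k0
          have hcast : (n : Int) + PySem.Chars.find s d + (d.length : Int) =
              ((n + j + d.length : Nat) : Int) := by rw [hjf]; push_cast; ring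
          rw [hff2, if_neg hkne, hcast]
          rw [if_neg (show ¬(((n + j + d.length : Nat) : Int) +
            PySem.Chars.find rest d = -1) by rw [hkf]; push_cast; omega)]
          have hslice3 : PySem.Chars.slice t (some ((n + j + d.length : Nat) : Int))
              (some (((n + j + d.length : Nat) : Int) + PySem.Chars.find rest d)) =
              rest.take k := by
            rw [hkf, show ((n + j + d.length : Nat) : Int) + (k : Int) =
                ((n + j + d.length + k : Nat) : Int) by push_cast; ring]
            simp only [PySem.Chars.slice_eq_listSlice]
            rw [PySem.List.slice_natCast, hrest]
            congr 1
            omega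
          have hdrop2 : t.drop (n + j + d.length + k + d.length) =
              rest.drop (k + d.length) := by
            rw [hrestdef, ← hdrop, List.drop_drop, List.drop_drop]
            congr 1
            omega
          have hrl : rest.length = s.length - (j + d.length) := by
            rw [hrestdef]; simp
          have hlen2 : (rest.drop (k + d.length)).length + 1 ≤ fuel := by
            simp only [List.length_drop]
            omega
          rw [show ((n + j + d.length : Nat) : Int) + PySem.Chars.find rest d +
              (d.length : Int) = ((n + j + d.length + k + d.length : Nat) : Int) by
            rw [hkf]; push_cast; ring]
          rw [ih (rest.drop (k + d.length)) t (n + j + d.length + k + d.length) _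
            hdrop2 hlen2]
          rw [pvSplit_cons d s hd h0, ← hj, ← hrestdef,
            pvSplit_cons d rest hd k0, ← hk]
          rw [findDelimitersParts, findDelimitersParts]
          rw [if_neg (pvSplit_ne_nil d (rest.drop (k + d.length)))]
          rw [hslice3]
          by_cases hjz : s.take j = []
          · have : ¬ ((n : Int) + PySem.Chars.find s d > (n : Int)) := by
              rcases List.take_eq_nil_iff.mp hjz with h | h
              · omega
              · exact absurd h hsne
            rw [if_neg this, if_pos hjz]
            simp
          · have hjpos : 0 < j := by
              by_contra hz
              exact hjz (by simp [show j = 0 by omega])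
            rw [if_pos (by omega), if_neg hjz, hslice1]
            simp
        · -- no closing delimiter: opening treated as plain text
          have hkneg : PySem.Chars.find (s.drop (j + d.length)) d = -1 :=
            pv_find_neg_one _ _ k0
          rw [hff2, if_pos hkneg, if_pos rfl]
          have hslice2 : PySem.Chars.slice t
              (some ((n : Int) + PySem.Chars.find s d)) none = s.drop j := by
            rw [hjf, show (n : Int) + (j : Int) = ((n + j : Nat) : Int) by push_cast; ring]
            simp only [PySem.Chars.slice_eq_listSlice]
            rw [PySem.List.slice_from_natCast, ← hdrop, List.drop_drop]
          rw [hslice1, hslice2]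
          rw [pvSplit_cons d s hd h0, ← hj,
            pvSplit_single d _ hkneg]
          have hsd : s.drop j = d ++ s.drop (j + d.length) :=
            pv_drop_eq_append d s j hpre
          rw [findDelimitersParts, findDelimitersParts, findDelimitersParts]
          rw [hsd]
          by_cases hjz : s.take j = []
          · have : ¬ ((n : Int) + PySem.Chars.find s d > (n : Int)) := by
              rcases List.take_eq_nil_iff.mp hjz with h | h
              · omega
              · exact absurd h hsne
            rw [if_neg this, if_pos hjz]
            simp
          · have hjpos : 0 < j := by
              by_contra hz
              exact hjz (by simp [show j = 0 by omega])
            rw [if_pos (by omega), if_neg hjz]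
            simp
      · -- no delimiter in the suffix: emit the remaining text
        have hneg : PySem.Chars.find s d = -1 := pv_find_neg_one _ _ h0
        rw [hff, if_pos hneg, if_pos rfl]
        have hslice : PySem.Chars.slice t (some (n : Int)) none = s := by
          simp only [PySem.Chars.slice_eq_listSlice]
          rw [PySem.List.slice_from_natCast, hdrop]
        rw [hslice, if_pos hsne]
        rw [pvSplit_single d s hneg]
        rw [findDelimitersParts, findDelimitersParts]
        rw [if_neg hsne]
        simp
    · rw [if_neg hcp]
      have hs : s = [] := by
        rw [← hdrop]
        exact List.drop_eq_nil_of_le (by exact_mod_cast not_lt.mp hcp)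
      subst hs
      rw [pvSplit_single d [] (pv_find_nil d hd)]
      rw [findDelimitersParts, findDelimitersParts]
      simp

-- ===== VERDICT (by name: the statement is the Claim_ definition above) =====
theorem find_delimiters_spec : Claim_equal_find_delimiters := by
  intro text delimiter _ hpre
  unfold Spec_find_delimiters find_delimiters find_delimiters_alt
  have hd : delimiter.toList ≠ [] := by
    intro h
    exact hpre (String.toList_eq_nil_iff.mp h)
  rw [pv_splitOn_eq _ _ hd]
  have := pv_loop_eq delimiter.toList hd (text.toList.length + 1) text.toList text.toList 0 []
      (by simp) (by simp)
  simp only [Nat.cast_zero] at this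
  rw [this]
  simp
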